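-- pv_equiv track=rewrite | github.com/Shahriyar-Khan27/ai_firewall | ai_firewall/discovery/mcp_detector.py | _extract_upstream
-- ===== SOURCE A (Python) =====
-- def _extract_upstream(args: tuple[str, ...]) -> tuple[str | None, tuple[str, ...]]:
--     """Pull the original command/args back out of a wrapper's args list."""
--     args_list = list(args)
--     upstream_cmd: str | None = None
--     upstream_args: list[str] = []
--     i = 0
--     while i < len(args_list):
--         a = args_list[i]
--         if a == "--upstream-cmd" and i + 1 < len(args_list):
--             upstream_cmd = args_list[i + 1]
--             i += 2
--         elif a == "--upstream-arg" and i + 1 < len(args_list):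
--             upstream_args.append(args_list[i + 1])
--             i += 2
--         else:
--             i += 1
--     return upstream_cmd, tuple(upstream_args)
-- ===== SOURCE B (Python) =====
-- def _extract_upstream(args):
--     """Pull the original command/args back out of a wrapper's args list."""
--     upstream_cmd = None
--     upstream_args = []
--     pending = None
--     for a in args:
--         if pending == "cmd":
--             upstream_cmd = a
--             pending = None
--         elif pending == "arg":
--             upstream_args.append(a)
--             pending = None
--         elif a == "--upstream-cmd":
--             pending = "cmd"
--         elif a == "--upstream-arg":
--             pending = "arg"
--     return upstream_cmd, tuple(upstream_args)
-- ===== Notes on version B (the rewrite author's own statement) =====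
-- stated objective: alternative
-- what changed: Replaces the index-jumping while loop with lookahead (i+1 < len guard, i += 2 skips) by a single for-loop over the elements carrying a 'pending' state flag that records whether the previous element was a flag awaiting its value; avoids repeated indexing/len calls.
import Mathlib
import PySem

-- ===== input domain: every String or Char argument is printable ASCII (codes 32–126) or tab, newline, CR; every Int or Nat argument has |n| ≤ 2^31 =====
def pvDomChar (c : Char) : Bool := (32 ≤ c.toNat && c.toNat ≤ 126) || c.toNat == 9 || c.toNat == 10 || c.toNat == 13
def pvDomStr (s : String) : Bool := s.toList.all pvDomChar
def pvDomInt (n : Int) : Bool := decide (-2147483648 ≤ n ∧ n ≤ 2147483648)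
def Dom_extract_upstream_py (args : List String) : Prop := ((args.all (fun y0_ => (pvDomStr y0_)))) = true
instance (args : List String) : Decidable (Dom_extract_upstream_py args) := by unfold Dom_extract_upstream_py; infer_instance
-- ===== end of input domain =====

-- B replaces A's index-jumping while loop (lookahead + skip-by-2) with a single
-- for-loop carrying a 'pending' flag; alternative decomposition, same O(n) cost.


-- ===== PORT A =====
-- A's while loop over index i: a flag with a following value consumes two
-- positions (i += 2); anything else (including a trailing flag) consumes one.
-- Ported as recursion on the remaining suffix of the list.
def extract_upstream_loop : List String → Option String → List String → Option String × List String
  | [], cmd, acc => (cmd, acc)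
  | [_], cmd, acc => (cmd, acc)          -- last element: the i+1 < len guard fails, i += 1, loop ends
  | a :: v :: rest, cmd, acc =>
    if a = "--upstream-cmd" then extract_upstream_loop rest (some v) acc
    else if a = "--upstream-arg" then extract_upstream_loop rest cmd (acc ++ [v])
    else extract_upstream_loop (v :: rest) cmd acc

def extract_upstream_py (args : List String) : Option String × List String :=
  extract_upstream_loop args none []

-- ===== PORT B =====
-- B's single pass: state (upstream_cmd, upstream_args, pending) folded over args.
def extract_upstream_step (st : Option String × List String × Option String) (a : String) :
    Option String × List String × Option String :=
  match st with
  | (cmd, acc, pending) =>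
    if pending = some "cmd" then (some a, acc, none)
    else if pending = some "arg" then (cmd, acc ++ [a], none)
    else if a = "--upstream-cmd" then (cmd, acc, some "cmd")
    else if a = "--upstream-arg" then (cmd, acc, some "arg")
    else (cmd, acc, none)

def extract_upstream_py_alt (args : List String) : Option String × List String :=
  let s := args.foldl extract_upstream_step (none, [], none)
  (s.1, s.2.1)

-- ===== PRECONDITION & SPEC =====
def Spec_extract_upstream_py (args : List String) (out : Option String × List String) : Prop := out = extract_upstream_py_alt args
instance (args : List String) (out : Option String × List String) : Decidable (Spec_extract_upstream_py args out) := by unfold Spec_extract_upstream_py; infer_instance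

-- ===== CLAIM (what is proved, stated in full; the proofs are below) =====
def Claim_equal_extract_upstream_py : Prop := ∀ (args : List String), Dom_extract_upstream_py args → Spec_extract_upstream_py args (extract_upstream_py args)

-- ===== LEMMAS AND PROOFS =====

-- Core invariant: A's suffix recursion equals B's fold started with no pending flag.
theorem extract_upstream_loop_eq_foldl (args : List String) (cmd : Option String) (acc : List String) :
      extract_upstream_loop args cmd acc =
        ((args.foldl extract_upstream_step (cmd, acc, none)).1,
         (args.foldl extract_upstream_step (cmd, acc, none)).2.1) := by
  induction args, cmd, acc using extract_upstream_loop.induct with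
  | case1 cmd acc => simp [extract_upstream_loop]
  | case2 a cmd acc =>
    simp only [extract_upstream_loop, List.foldl, extract_upstream_step]
    split_ifs <;> simp_all
  | case3 v rest cmd acc ih =>
    simp only [extract_upstream_loop, List.foldl, extract_upstream_step]
    simp [ih]
  | case4 v rest cmd acc h1 ih =>
    simp only [extract_upstream_loop, List.foldl, extract_upstream_step]
    simp [ih]
  | case5 a v rest cmd acc h1 h2 ih =>
    simp only [extract_upstream_loop, if_neg h1, if_neg h2]
    rw [ih]
    simp only [List.foldl, extract_upstream_step, h1, h2]
    simp

-- ===== VERDICT (by name: the statement is the Claim_ definition above) =====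
theorem extract_upstream_py_spec : Claim_equal_extract_upstream_py := by
  intro args _
  unfold Spec_extract_upstream_py extract_upstream_py extract_upstream_py_alt
  exact extract_upstream_loop_eq_foldl args none []
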